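-- pv_equiv track=rewrite | github.com/ArthurTelles-hub/PassVrf | src/patterns.py | possui_substituicao_leet
-- ===== SOURCE A (Python) =====
-- def possui_substituicao_leet(senha):
--     mapeamento = {
--         '4': 'a', '3': 'e', '1': 'i', '0': 'o',
--         '5': 's', '7': 't', '8': 'b', '@': 'a',
--         '$': 's', '!': 'i'
--     }
--     senha_traduzida = senha.lower()
--     detectou = False
--     for char_leet, char_normal in mapeamento.items():
--         if char_leet in senha_traduzida:
--             senha_traduzida = senha_traduzida.replace(char_leet, char_normal)
--             detectou = True
--     return detectou, senha_traduzida
-- ===== SOURCE B (Python) =====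
-- def possui_substituicao_leet(senha):
--     mapeamento = {
--         '4': 'a', '3': 'e', '1': 'i', '0': 'o',
--         '5': 's', '7': 't', '8': 'b', '@': 'a',
--         '$': 's', '!': 'i'
--     }
--     baixa = senha.lower()
--     traduzida = baixa.translate(str.maketrans(mapeamento))
--     return traduzida != baixa, traduzida
-- ===== Notes on version B (the rewrite author's own statement) =====
-- stated objective: idiomatic
-- what changed: Replaces the ten-iteration membership-test-and-replace loop by a single-pass str.translate over a maketrans table, detecting leet by comparing the translated string with the lowercased original (valid because no mapping value is itself a key).
import Mathlib
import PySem

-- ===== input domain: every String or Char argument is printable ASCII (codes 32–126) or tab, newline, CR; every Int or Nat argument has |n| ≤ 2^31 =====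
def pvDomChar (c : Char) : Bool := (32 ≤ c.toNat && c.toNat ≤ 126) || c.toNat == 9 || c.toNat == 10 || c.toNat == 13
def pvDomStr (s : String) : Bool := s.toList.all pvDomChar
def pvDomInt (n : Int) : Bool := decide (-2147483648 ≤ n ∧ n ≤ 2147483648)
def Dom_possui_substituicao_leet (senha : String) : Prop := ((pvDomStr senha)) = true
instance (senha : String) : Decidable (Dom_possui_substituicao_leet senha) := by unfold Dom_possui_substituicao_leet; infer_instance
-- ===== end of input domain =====

-- B replaces A's ten membership-test-and-replace passes by one per-character translation pass
-- (str.translate) and detects leet by comparing the translation with the lowercased input (idiomatic).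

-- ===== PORT A =====
def possui_substituicao_leet (senha : String) : Bool × String :=
  let mapeamento : List (String × String) :=
    [("4", "a"), ("3", "e"), ("1", "i"), ("0", "o"),
     ("5", "s"), ("7", "t"), ("8", "b"), ("@", "a"),
     ("$", "s"), ("!", "i")]
  let res := mapeamento.foldl
    (fun (st : String × Bool) kv =>
      if PySem.Str.isIn kv.1 st.1 then (PySem.Str.replace st.1 kv.1 kv.2, true) else st)
    (PySem.Str.lower senha, false)
  (res.2, res.1)

-- ===== PORT B =====
-- the translation table built by str.maketrans(mapeamento), as a per-character function
def leetChar (c : Char) : Char :=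
  if c = '4' then 'a' else if c = '3' then 'e' else if c = '1' then 'i' else if c = '0' then 'o'
  else if c = '5' then 's' else if c = '7' then 't' else if c = '8' then 'b' else if c = '@' then 'a'
  else if c = '$' then 's' else if c = '!' then 'i' else c

def possui_substituicao_leet_alt (senha : String) : Bool × String :=
  let baixa := PySem.Str.lower senha
  let traduzida := String.ofList (baixa.toList.map leetChar)  -- baixa.translate(table): one pass
  (decide (traduzida ≠ baixa), traduzida)

-- ===== PRECONDITION & SPEC =====
def Spec_possui_substituicao_leet (senha : String) (out : Bool × String) : Prop := out = possui_substituicao_leet_alt senha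
instance (senha : String) (out : Bool × String) : Decidable (Spec_possui_substituicao_leet senha out) := by unfold Spec_possui_substituicao_leet; infer_instance

-- ===== CLAIM (what is proved, stated in full; the proofs are below) =====
def Claim_equal_possui_substituicao_leet : Prop := ∀ (senha : String), Dom_possui_substituicao_leet senha → Spec_possui_substituicao_leet senha (possui_substituicao_leet senha)


-- ===== LEMMAS AND PROOFS =====

-- one substitution step of A, as a per-character function
def pvSubst (k v c : Char) : Char := if c = k then v else c

-- a char pair as the pair of one-character strings A's table holds
def pvStrPair (p : Char × Char) : String × String := (String.ofList [p.1], String.ofList [p.2])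

theorem pvReplaceGo_single (k v : Char) (l acc : List Char) (fuel : Nat) (h : l.length ≤ fuel) :
    PySem.Chars.replace.go [k] [v] fuel l acc = acc.reverse ++ l.map (pvSubst k v) := by
  induction l generalizing fuel acc with
  | nil => cases fuel <;> simp [PySem.Chars.replace.go]
  | cons c t ih =>
    cases fuel with
    | zero => simp at h
    | succ n =>
      simp only [PySem.Chars.replace.go]
      by_cases hk : c = k
      · subst hk
        simp only [List.isPrefixOf, beq_self_eq_true, Bool.true_and,
          List.length_singleton, List.drop_succ_cons, List.drop_zero, List.reverse_singleton,
          List.singleton_append, if_true]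
        rw [ih _ _ (by simpa using Nat.le_of_succ_le_succ h)]
        simp [pvSubst]
      · have hne : (k == c) = false := by simpa using Ne.symm hk
        simp only [List.isPrefixOf, hne, Bool.false_and, Bool.false_eq_true, if_false]
        rw [ih _ _ (by simpa using Nat.le_of_succ_le_succ h)]
        simp [pvSubst, hk]

theorem pvReplace_single (k v : Char) (l : List Char) :
    PySem.Chars.replace l [k] [v] = l.map (pvSubst k v) := by
  rw [PySem.Chars.replace]
  simp only [List.isEmpty_cons, Bool.false_eq_true, if_false]
  exact pvReplaceGo_single k v l [] l.length le_rfl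

theorem pvMem_map_subst {c k v : Char} (l : List Char) (hk : c ≠ k) (hv : c ≠ v) :
    (c ∈ l.map (pvSubst k v)) ↔ c ∈ l := by
  simp only [List.mem_map]
  constructor
  · rintro ⟨x, hx, hfx⟩
    unfold pvSubst at hfx
    split_ifs at hfx with h
    · exact absurd hfx.symm hv
    · exact hfx ▸ hx
  · intro hc; exact ⟨c, hc, by simp [pvSubst, hk]⟩

theorem pvMap_eq_self (f : Char → Char) (l : List Char) : l.map f = l ↔ ∀ c ∈ l, f c = c := by
  induction l with
  | nil => simp
  | cons c t ih => simp [ih]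

-- one loop step of A, at the String level
theorem pvStepA (s : String) (d : Bool) (kc vc : Char) :
    (if PySem.Str.isIn (String.ofList [kc]) s then (PySem.Str.replace s (String.ofList [kc]) (String.ofList [vc]), true) else (s, d))
    = (String.ofList (s.toList.map (pvSubst kc vc)), d || decide (kc ∈ s.toList)) := by
  have hmem : PySem.Str.isIn (String.ofList [kc]) s = decide (kc ∈ s.toList) := by
    rw [Bool.eq_iff_iff, decide_eq_true_eq, PySem.Str.isIn_iff_infix, String.toList_ofList,
      List.singleton_infix_iff]
  rw [hmem]
  by_cases hc : kc ∈ s.toList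
  · simp only [hc, decide_true, if_true, Bool.or_true]
    rw [PySem.Str.replace, String.toList_ofList, String.toList_ofList, pvReplace_single]
  · simp only [hc, decide_false, Bool.false_eq_true, if_false, Bool.or_false]
    rw [(pvMap_eq_self _ _).mpr (fun c hcl => by
        have hne : c ≠ kc := fun h => hc (h ▸ hcl)
        simp [pvSubst, hne]),
      String.ofList_toList]

-- A's whole loop, for any leet table whose keys are distinct and never values
theorem pvFold (cps : List (Char × Char)) (s : String) (d : Bool)
    (hkv : ∀ p ∈ cps, ∀ q ∈ cps, p.1 ≠ q.2)
    (hkk : (cps.map Prod.fst).Nodup) :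
    (cps.map pvStrPair).foldl
      (fun (st : String × Bool) kv =>
        if PySem.Str.isIn kv.1 st.1 then (PySem.Str.replace st.1 kv.1 kv.2, true) else st)
      (s, d)
    = (String.ofList (cps.foldl (fun l p => l.map (pvSubst p.1 p.2)) s.toList),
       d || cps.any (fun p => decide (p.1 ∈ s.toList))) := by
  induction cps generalizing s d with
  | nil => simp [String.ofList_toList]
  | cons p rest ih =>
    have hcons : p.1 ∉ rest.map Prod.fst ∧ (rest.map Prod.fst).Nodup := by
      rw [List.map_cons, List.nodup_cons] at hkk; exact hkk
    simp only [List.map_cons, List.foldl_cons, pvStrPair, pvStepA]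
    rw [ih _ _ (fun a ha b hb => hkv a (List.mem_cons_of_mem _ ha) b (List.mem_cons_of_mem _ hb))
          hcons.2]
    rw [String.toList_ofList]
    have hany : rest.any (fun q => decide (q.1 ∈ s.toList.map (pvSubst p.1 p.2)))
        = rest.any (fun q => decide (q.1 ∈ s.toList)) := by
      refine PySem.List.any_congr_mem (fun q hq => ?_)
      have h1 : q.1 ≠ p.1 := fun h => hcons.1 (h ▸ List.mem_map_of_mem hq)
      have h2 : q.1 ≠ p.2 := hkv q (List.mem_cons_of_mem _ hq) p (List.mem_cons_self)
      simp [pvMem_map_subst _ h1 h2]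
    rw [hany]
    simp [List.any_cons, Bool.or_assoc]

-- the ten composed substitutions are exactly leetChar
theorem pvChain_eq (c : Char) :
    pvSubst '!' 'i' (pvSubst '$' 's' (pvSubst '@' 'a' (pvSubst '8' 'b' (pvSubst '7' 't'
      (pvSubst '5' 's' (pvSubst '0' 'o' (pvSubst '1' 'i' (pvSubst '3' 'e' (pvSubst '4' 'a' c)))))))))
    = leetChar c := by
  by_cases h1 : c = '4'
  · subst h1; decide
  by_cases h2 : c = '3'
  · subst h2; decide
  by_cases h3 : c = '1'
  · subst h3; decide
  by_cases h4 : c = '0'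
  · subst h4; decide
  by_cases h5 : c = '5'
  · subst h5; decide
  by_cases h6 : c = '7'
  · subst h6; decide
  by_cases h7 : c = '8'
  · subst h7; decide
  by_cases h8 : c = '@'
  · subst h8; decide
  by_cases h9 : c = '$'
  · subst h9; decide
  by_cases h10 : c = '!'
  · subst h10; decide
  simp [pvSubst, leetChar, h1, h2, h3, h4, h5, h6, h7, h8, h9, h10]

theorem pvLeetChar_ne_iff (c : Char) :
    leetChar c ≠ c ↔ c ∈ ['4','3','1','0','5','7','8','@','$','!'] := by
  by_cases h1 : c = '4'
  · subst h1; decide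
  by_cases h2 : c = '3'
  · subst h2; decide
  by_cases h3 : c = '1'
  · subst h3; decide
  by_cases h4 : c = '0'
  · subst h4; decide
  by_cases h5 : c = '5'
  · subst h5; decide
  by_cases h6 : c = '7'
  · subst h6; decide
  by_cases h7 : c = '8'
  · subst h7; decide
  by_cases h8 : c = '@'
  · subst h8; decide
  by_cases h9 : c = '$'
  · subst h9; decide
  by_cases h10 : c = '!'
  · subst h10; decide
  simp [leetChar, h1, h2, h3, h4, h5, h6, h7, h8, h9, h10]

-- ===== VERDICT (by name: the statement is the Claim_ definition above) =====
theorem pvMaps (L : List Char) :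
    (((((((((((L.map (pvSubst '4' 'a')).map (pvSubst '3' 'e')).map (pvSubst '1' 'i')).map
      (pvSubst '0' 'o')).map (pvSubst '5' 's')).map (pvSubst '7' 't')).map (pvSubst '8' 'b')).map
      (pvSubst '@' 'a')).map (pvSubst '$' 's')).map (pvSubst '!' 'i'))) = L.map leetChar := by
  simp only [List.map_map]
  refine List.map_congr_left (fun c _ => ?_)
  simpa [Function.comp] using pvChain_eq c

theorem pvOfList_eq_iff (l : List Char) (s : String) : String.ofList l = s ↔ l = s.toList := by
  constructor
  · intro h; rw [← h, String.toList_ofList]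
  · intro h; rw [h, String.ofList_toList]

theorem possui_substituicao_leet_spec : Claim_equal_possui_substituicao_leet := by
  intro senha _
  unfold Spec_possui_substituicao_leet possui_substituicao_leet possui_substituicao_leet_alt
  dsimp only
  have hm : [(("4":String), ("a":String)), ("3", "e"), ("1", "i"), ("0", "o"), ("5", "s"),
      ("7", "t"), ("8", "b"), ("@", "a"), ("$", "s"), ("!", "i")]
      = List.map pvStrPair [('4','a'), ('3','e'), ('1','i'), ('0','o'), ('5','s'),
          ('7','t'), ('8','b'), ('@','a'), ('$','s'), ('!','i')] := by decide
  rw [hm, pvFold _ _ _ (by decide) (by decide)]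
  simp only [List.foldl_cons, List.foldl_nil, List.any_cons, List.any_nil]
  rw [pvMaps]
  refine Prod.ext ?_ rfl
  rw [Bool.eq_iff_iff]
  simp only [Bool.or_eq_true, Bool.false_or, decide_eq_true_eq, ne_eq]
  rw [pvOfList_eq_iff]
  rw [pvMap_eq_self]
  push Not
  simp only [or_false, Bool.false_eq_true]
  constructor
  · rintro (h | h | h | h | h | h | h | h | h | h)
    exacts [⟨'4', h, by decide⟩, ⟨'3', h, by decide⟩, ⟨'1', h, by decide⟩, ⟨'0', h, by decide⟩,
      ⟨'5', h, by decide⟩, ⟨'7', h, by decide⟩, ⟨'8', h, by decide⟩, ⟨'@', h, by decide⟩,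
      ⟨'$', h, by decide⟩, ⟨'!', h, by decide⟩]
  · rintro ⟨c, hc, hne⟩
    have hmem := (pvLeetChar_ne_iff c).mp hne
    fin_cases hmem <;> simp_all
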